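-- pv_equiv track=rewrite | github.com/xiaoda99/BARC | seeds/process_hex_scripts.py | strip_imports_and_truncate
-- ===== SOURCE A (Python) =====
-- def strip_imports_and_truncate(content: str) -> str:
--     lines = content.splitlines()
--     output_lines: list[str] = []
--
--     for line in lines:
--         stripped = line.lstrip()
--         if stripped.startswith("def generate_input"):
--             break
--         if stripped.startswith("import ") or stripped.startswith("from "):
--             continue
--         output_lines.append(line)
--
--     return "\n".join(output_lines).rstrip() + "\n"
-- ===== SOURCE B (Python) =====
-- def strip_imports_and_truncate(content: str) -> str:
--     lines = content.splitlines()
--     cut = next((i for i, l in enumerate(lines)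
--                 if l.lstrip().startswith("def generate_input")), len(lines))
--     body = [l for l in lines[:cut]
--             if not l.lstrip().startswith(("import ", "from "))]
--     return "\n".join(body).rstrip() + "\n"
-- ===== Notes on version B (the rewrite author's own statement) =====
-- stated objective: alternative
-- what changed: Replaces the single break/continue loop by two separate passes: first locate the cutoff index of the generate_input marker line (defaulting to the number of lines), then filter import/from lines out of the prefix slice with a comprehension.
import Mathlib
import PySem

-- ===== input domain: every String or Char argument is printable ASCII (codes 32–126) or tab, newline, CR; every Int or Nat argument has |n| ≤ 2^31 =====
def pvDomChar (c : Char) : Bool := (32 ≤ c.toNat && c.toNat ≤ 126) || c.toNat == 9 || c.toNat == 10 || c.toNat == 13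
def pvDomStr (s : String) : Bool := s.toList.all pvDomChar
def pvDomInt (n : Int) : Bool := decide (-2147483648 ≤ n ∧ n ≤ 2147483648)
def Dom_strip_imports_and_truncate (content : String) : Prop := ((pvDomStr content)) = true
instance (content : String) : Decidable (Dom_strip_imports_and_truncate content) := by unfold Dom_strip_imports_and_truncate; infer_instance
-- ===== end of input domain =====

-- B replaces A's single break/continue loop by a locate-the-cutoff pass plus a filter over the prefix (alternative decomposition, same cost).

-- ===== PORT A =====
-- the for-loop with break/continue, accumulating output_lines
def stripA_loop (lines : List String) (acc : List String) : List String :=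
  match lines with
  | [] => acc
  | line :: rest =>
    let stripped := PySem.Str.lstrip line
    if PySem.Str.startswith stripped "def generate_input" then acc
    else if PySem.Str.startswith stripped "import " || PySem.Str.startswith stripped "from " then
      stripA_loop rest acc
    else stripA_loop rest (acc ++ [line])

def strip_imports_and_truncate (content : String) : String :=
  PySem.Str.rstrip (PySem.Str.join "\n" (stripA_loop (PySem.Str.splitlines content) [])) ++ "\n"

-- ===== PORT B =====
def pvIsMarker (l : String) : Bool :=
  PySem.Str.startswith (PySem.Str.lstrip l) "def generate_input"

def pvIsImport (l : String) : Bool :=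
  PySem.Str.startswith (PySem.Str.lstrip l) "import " || PySem.Str.startswith (PySem.Str.lstrip l) "from "

def strip_imports_and_truncate_alt (content : String) : String :=
  let lines := PySem.Str.splitlines content
  let cut : Nat := (lines.findIdx? pvIsMarker).getD lines.length
  let body := (lines.take cut).filter (fun l => !pvIsImport l)
  PySem.Str.rstrip (PySem.Str.join "\n" body) ++ "\n"

-- ===== PRECONDITION & SPEC =====
def Spec_strip_imports_and_truncate (content : String) (out : String) : Prop := out = strip_imports_and_truncate_alt content
instance (content : String) (out : String) : Decidable (Spec_strip_imports_and_truncate content out) := by unfold Spec_strip_imports_and_truncate; infer_instance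

-- ===== CLAIM (what is proved, stated in full; the proofs are below) =====
def Claim_equal_strip_imports_and_truncate : Prop := ∀ (content : String), Dom_strip_imports_and_truncate content → Spec_strip_imports_and_truncate content (strip_imports_and_truncate content)

-- ===== LEMMAS AND PROOFS =====
theorem stripA_loop_eq (lines : List String) : ∀ (acc : List String),
    stripA_loop lines acc
      = acc ++ (lines.take ((lines.findIdx? pvIsMarker).getD lines.length)).filter (fun l => !pvIsImport l) := by
  induction lines with
  | nil => intro acc; simp [stripA_loop]
  | cons line rest ih =>
    intro acc
    rw [stripA_loop]
    have e1 : PySem.Str.startswith (PySem.Str.lstrip line) "def generate_input" = pvIsMarker line := rfl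
    have e2 : (PySem.Str.startswith (PySem.Str.lstrip line) "import " || PySem.Str.startswith (PySem.Str.lstrip line) "from ") = pvIsImport line := rfl
    rw [e1, e2]
    simp only [List.findIdx?_cons]
    cases hm : pvIsMarker line with
    | true => simp
    | false =>
      simp only [if_neg Bool.false_ne_true]
      have hcut : ((Option.map (· + 1) (rest.findIdx? pvIsMarker)).getD (rest.length + 1))
          = ((rest.findIdx? pvIsMarker).getD rest.length) + 1 := by
        cases rest.findIdx? pvIsMarker <;> simp
      cases hi : pvIsImport line with
      | true =>
        simp only [if_true, ih acc]
        simp [hcut, hi]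
      | false =>
        simp only [Bool.false_eq_true, if_false, ih (acc ++ [line])]
        simp [hcut, hi]

-- ===== VERDICT (by name: the statement is the Claim_ definition above) =====
theorem strip_imports_and_truncate_spec : Claim_equal_strip_imports_and_truncate := by
  intro content _
  unfold Spec_strip_imports_and_truncate strip_imports_and_truncate strip_imports_and_truncate_alt
  rw [stripA_loop_eq]
  simp
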